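-- pv_equiv track=rewrite | github.com/idodo01/2024.01.21_Programmers_Study | list_bool.py | solution
-- ===== SOURCE A (Python) =====
-- def solution(my_string, indices):
--     answer = ''
--     check = True
--
--
--     for i in range(len(my_string)) :
--         for j in range(len(indices)):
--             if i == indices[j] :
--                  check = False
--
--         if(check) :
--             answer += my_string[i]
--         check = True
--
--     return answer
-- ===== SOURCE B (Python) =====
-- def solution(my_string, indices):
--     n = len(my_string)
--     cuts = sorted({i for i in indices if 0 <= i < n})
--     pieces = []
--     prev = 0
--     for c in cuts:
--         pieces.append(my_string[prev:c])
--         prev = c + 1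
--     pieces.append(my_string[prev:])
--     return ''.join(pieces)
-- ===== Notes on version B (the rewrite author's own statement) =====
-- stated objective: faster
-- what changed: A tests every character position against the whole index list (nested loops); B sorts the deduplicated in-range indices once and concatenates the surviving slices between consecutive cut points.
import Mathlib
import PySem

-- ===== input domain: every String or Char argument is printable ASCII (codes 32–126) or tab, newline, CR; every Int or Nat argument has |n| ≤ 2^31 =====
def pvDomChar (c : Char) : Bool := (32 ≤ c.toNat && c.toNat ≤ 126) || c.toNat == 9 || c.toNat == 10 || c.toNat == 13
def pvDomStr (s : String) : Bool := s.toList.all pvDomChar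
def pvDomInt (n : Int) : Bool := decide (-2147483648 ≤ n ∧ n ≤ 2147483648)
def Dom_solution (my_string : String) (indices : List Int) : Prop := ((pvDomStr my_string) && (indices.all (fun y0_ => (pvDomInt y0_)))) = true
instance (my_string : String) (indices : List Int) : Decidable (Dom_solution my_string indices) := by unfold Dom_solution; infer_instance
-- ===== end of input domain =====

-- B replaces A's O(n·m) per-character membership scan by sorting the deduplicated in-range
-- indices once and concatenating the surviving slices between them (objective: faster).

-- ===== PORT A =====
-- for each character position, an inner scan over `indices` decides whether to keep it
def solution (my_string : String) (indices : List Int) : String :=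
  let cs := my_string.toList
  String.ofList <|
    (PySem.List.pyRange 0 (PySem.Str.len my_string) 1).foldl
      (fun answer i =>
        let check := indices.foldl (fun check j => if i == j then false else check) true
        if check then answer ++ [PySem.List.pyGetD cs i ' '] else answer)
      []

-- ===== PORT B =====
-- sorted deduplicated in-range cut points; join the slices between consecutive cuts
def solution_alt (my_string : String) (indices : List Int) : String :=
  let n : Int := PySem.Str.len my_string
  let cuts := PySem.List.sorted
    (PySem.Set.ofList (indices.filter (fun i => decide (0 ≤ i) && decide (i < n)))) (fun x => x) false
  let st := cuts.foldl
    (fun (st : List String × Int) c => (st.1 ++ [PySem.Str.slice my_string (some st.2) (some c)], c + 1))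
    (([] : List String), (0 : Int))
  PySem.Str.join "" (st.1 ++ [PySem.Str.slice my_string (some st.2) none])

-- ===== PRECONDITION & SPEC =====
def Spec_solution (my_string : String) (indices : List Int) (out : String) : Prop := out = solution_alt my_string indices
instance (my_string : String) (indices : List Int) (out : String) : Decidable (Spec_solution my_string indices out) := by unfold Spec_solution; infer_instance

-- ===== CLAIM (what is proved, stated in full; the proofs are below) =====
def Claim_equal_solution : Prop := ∀ (my_string : String) (indices : List Int), Dom_solution my_string indices → Spec_solution my_string indices (solution my_string indices)

-- ===== LEMMAS AND PROOFS =====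

-- A's inner `for j` loop computes `acc && (i not in indices)`
theorem checkLoop (ind : List Int) (i : Int) (b : Bool) :
    ind.foldl (fun c j => if i == j then false else c) b = (b && !(decide (i ∈ ind))) := by
  induction ind generalizing b with
  | nil => simp
  | cons j js ih =>
    simp only [List.foldl_cons]
    rw [ih]
    by_cases h : i = j <;> simp [h]

-- ''.join is concatenation
theorem joinNil_eq_flatten (parts : List (List Char)) :
    PySem.Chars.join [] parts = parts.flatten := by
  induction parts with
  | nil => simp [PySem.Chars.join_nil]
  | cons a t ih =>
    cases t with
    | nil => simp [PySem.Chars.join_singleton]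
    | cons b u =>
      simp only [PySem.Chars.join_cons_cons] at ih ⊢
      simpa using ih

-- the characters of `l` at positions ≥ prev whose index is not a cut
def sel (l : List Char) (prev : Int) (cuts : List Int) : List Char :=
  ((PySem.List.enumerate (l.drop prev.toNat) prev).filter (fun p => !decide (p.1 ∈ cuts))).map (·.2)

theorem sel_cons (l : List Char) (prev c : Int) (cs : List Int)
    (h0 : 0 ≤ prev) (hpc : prev ≤ c) (hc : c < (l.length : Int))
    (hcs : ∀ x ∈ cs, c < x) :
    sel l prev (c :: cs) = PySem.List.slice l (some prev) (some c) ++ sel l (c + 1) cs := by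
  have h0c : 0 ≤ c := le_trans h0 hpc
  set p := prev.toNat with hp
  set k := c.toNat with hk
  have hprev : (p : Int) = prev := Int.toNat_of_nonneg h0
  have hcint : (k : Int) = c := Int.toNat_of_nonneg h0c
  have hpk : p ≤ k := by omega
  have hkn : k < l.length := by omega
  -- split the suffix at position k
  have hsplit : l.drop p = (l.drop p).take (k - p) ++ (l[k] :: l.drop (k + 1)) := by
    conv_lhs => rw [← List.take_append_drop (k - p) (l.drop p)]
    congr 1
    rw [List.drop_drop]
    have hpk2 : p + (k - p) = k := by omega
    rw [hpk2, List.drop_eq_getElem_cons hkn]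
  have hlen : ((l.drop p).take (k - p)).length = k - p := by
    simp [List.length_take, List.length_drop]; omega
  rw [sel, hsplit, PySem.List.enumerate_append, hlen]
  have hstart : prev + ((k - p : Nat) : Int) = c := by omega
  rw [hstart, PySem.List.enumerate_cons]
  rw [List.filter_append, List.filter_cons]
  have hcmem : (!decide ((c, l[k]).1 ∈ c :: cs)) = false := by simp
  rw [hcmem]
  simp only [Bool.false_eq_true, if_false]
  -- left part: every index is < c, hence not a cut
  have hleft : (PySem.List.enumerate ((l.drop p).take (k - p)) prev).filter
      (fun q => !decide (q.1 ∈ c :: cs)) = PySem.List.enumerate ((l.drop p).take (k - p)) prev := by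
    apply List.filter_eq_self.mpr
    intro q hq
    rw [PySem.List.mem_enumerate_iff] at hq
    obtain ⟨j, hj, rfl⟩ := hq
    have hjlt : prev + (j : Int) < c := by
      rw [hlen] at hj; omega
    rw [Bool.not_eq_true', decide_eq_false_iff_not]
    intro hmem
    rcases List.mem_cons.mp hmem with h | h
    · omega
    · exact absurd (hcs _ h) (by omega)
  rw [hleft]
  -- right part: every index is > c, so membership in c :: cs is membership in cs
  have hright : (PySem.List.enumerate (l.drop (k + 1)) (c + 1)).filter
      (fun q => !decide (q.1 ∈ c :: cs))
      = (PySem.List.enumerate (l.drop (k + 1)) (c + 1)).filter (fun q => !decide (q.1 ∈ cs)) := by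
    apply List.filter_congr
    intro q hq
    rw [PySem.List.mem_enumerate_iff] at hq
    obtain ⟨j, hj, rfl⟩ := hq
    simp only [List.mem_cons]
    have : ¬ (c + 1 + (j : Int) = c) := by omega
    simp [this]
  rw [hright]
  rw [List.map_append, PySem.List.map_snd_enumerate]
  congr 1
  · rw [PySem.List.slice_toNat l h0 h0c]
  · rw [sel]
    have : (c + 1).toNat = k + 1 := by omega
    rw [this]


theorem bLoop (l : List Char) (cuts : List Int) (acc : List (List Char)) (prev : Int)
    (h0 : 0 ≤ prev) (hs : cuts.Pairwise (· < ·))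
    (hm : ∀ c ∈ cuts, prev ≤ c ∧ c < (l.length : Int)) :
    (((cuts.foldl
        (fun (st : List (List Char) × Int) c =>
          (st.1 ++ [PySem.List.slice l (some st.2) (some c)], c + 1)) (acc, prev)).1
      ++ [PySem.List.slice l
            (some (cuts.foldl
              (fun (st : List (List Char) × Int) c =>
                (st.1 ++ [PySem.List.slice l (some st.2) (some c)], c + 1)) (acc, prev)).2)
            none]).flatten)
      = acc.flatten ++ sel l prev cuts := by
  induction cuts generalizing acc prev with
  | nil =>
    simp only [List.foldl_nil]
    rw [PySem.List.slice_from l h0]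
    rw [sel]
    have : (PySem.List.enumerate (l.drop prev.toNat) prev).filter (fun p => !decide (p.1 ∈ ([] : List Int)))
        = PySem.List.enumerate (l.drop prev.toNat) prev := by
      apply List.filter_eq_self.mpr; intro q _; simp
    rw [this, PySem.List.map_snd_enumerate]
    simp
  | cons c cs ih =>
    simp only [List.foldl_cons]
    have hmc := hm c (List.mem_cons_self)
    have hcs : ∀ x ∈ cs, c < x := fun x hx => (List.pairwise_cons.mp hs).1 x hx
    rw [ih (acc ++ [PySem.List.slice l (some prev) (some c)]) (c + 1)
        (by omega) (List.pairwise_cons.mp hs).2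
        (fun x hx => ⟨by have := hcs x hx; omega, (hm x (List.mem_cons_of_mem _ hx)).2⟩)]
    rw [sel_cons l prev c cs h0 hmc.1 hmc.2 hcs]
    simp


theorem solution_toList (my_string : String) (indices : List Int) :
    (solution my_string indices).toList
      = ((PySem.List.enumerate my_string.toList 0).filter
          (fun p => !decide (p.1 ∈ indices))).map (·.2) := by
  unfold solution
  simp only [checkLoop, Bool.true_and]
  rw [PySem.List.enumerate_eq_map_pyRange my_string.toList ' ', List.filter_map, List.map_map]
  simp only [Function.comp_def]
  rw [PySem.List.foldl_append_if (fun i => !decide (i ∈ indices)) (fun i => PySem.List.pyGetD my_string.toList i ' ')]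
  simp [PySem.Str.len, PySem.List.len]

theorem solution_alt_toList (my_string : String) (indices : List Int) :
    (solution_alt my_string indices).toList
      = ((PySem.List.enumerate my_string.toList 0).filter
          (fun p => !decide (p.1 ∈ indices))).map (·.2) := by
  unfold solution_alt
  set l := my_string.toList with hl
  set n : Int := PySem.Str.len my_string with hn
  have hnl : n = (l.length : Int) := by simp [hn, hl, PySem.Str.len]
  set cuts := PySem.List.sorted
    (PySem.Set.ofList (indices.filter (fun i => decide (0 ≤ i) && decide (i < n)))) (fun x => x) false with hcuts
  have hmemcuts : ∀ x, x ∈ cuts ↔ (x ∈ indices ∧ 0 ≤ x ∧ x < n) := by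
    intro x
    rw [hcuts, PySem.List.mem_sorted, PySem.Set.mem_ofList, List.mem_filter]
    simp
  have hs : cuts.Pairwise (· < ·) := PySem.List.sorted_ofList_pairwise_lt _
  -- move the String-level fold to the char level
  have hom := List.foldl_hom (l := cuts)
      (f := fun (st : List String × Int) => (st.1.map String.toList, st.2))
      (g₁ := fun (st : List String × Int) c => (st.1 ++ [PySem.Str.slice my_string (some st.2) (some c)], c + 1))
      (g₂ := fun (st : List (List Char) × Int) c => (st.1 ++ [PySem.List.slice l (some st.2) (some c)], c + 1))
      (init := (([] : List String), (0 : Int)))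
      (by intro x y; simp [hl])
  simp only [List.map_nil] at hom
  rw [PySem.Str.toList_join, List.map_append, List.map_singleton]
  have h2 : ((cuts.foldl (fun (st : List String × Int) c =>
      (st.1 ++ [PySem.Str.slice my_string (some st.2) (some c)], c + 1)) ([], 0)).1).map String.toList
      = (cuts.foldl (fun (st : List (List Char) × Int) c =>
      (st.1 ++ [PySem.List.slice l (some st.2) (some c)], c + 1)) ([], 0)).1 := by
    exact (congrArg Prod.fst hom).symm
  have h3 : (cuts.foldl (fun (st : List String × Int) c =>
      (st.1 ++ [PySem.Str.slice my_string (some st.2) (some c)], c + 1)) ([], 0)).2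
      = (cuts.foldl (fun (st : List (List Char) × Int) c =>
      (st.1 ++ [PySem.List.slice l (some st.2) (some c)], c + 1)) ([], 0)).2 := by
    exact (congrArg Prod.snd hom).symm
  rw [h2, h3, PySem.Str.toList_slice, PySem.Chars.slice_eq_listSlice]
  have hjoin : ("" : String).toList = ([] : List Char) := rfl
  rw [hjoin, joinNil_eq_flatten]
  rw [bLoop l cuts [] 0 (by omega) hs
      (fun c hc => by have := (hmemcuts c).mp hc; omega)]
  rw [sel]
  simp only [Int.toNat_zero, List.drop_zero, List.flatten_nil, List.nil_append]
  congr 1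
  apply List.filter_congr
  intro q hq
  rw [PySem.List.mem_enumerate_iff] at hq
  obtain ⟨k, hk, rfl⟩ := hq
  have : ((0 : Int) + (k : Int) ∈ cuts) ↔ ((0 : Int) + (k : Int) ∈ indices) := by
    rw [hmemcuts]
    constructor
    · exact fun h => h.1
    · intro h; exact ⟨h, by omega, by omega⟩
  exact congrArg (fun b => !b) (decide_eq_decide.mpr this)


-- ===== VERDICT (by name: the statement is the Claim_ definition above) =====
theorem solution_spec : Claim_equal_solution := by
  intro my_string indices _
  unfold Spec_solution
  apply String.toList_inj.mp
  rw [solution_toList, solution_alt_toList]
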